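-- pv_equiv track=rewrite | github.com/paprik05/Praca-Licencjacka | problems/prob38a.py | prob38a
-- ===== SOURCE A (Python) =====
-- def prob38a(n):
--     counter1 = 0
--     counter2 = 0
--
--     for d in range(1, n + 1):
--         if n % d == 0:
--             if d % 4 == 1:
--                 counter1 += 1
--             elif d % 4 == 3:
--                 counter2 += 1
--
--     return {"result": f"{n}: {counter1 >= counter2}, 4k+1 dividors count: {counter1}, 4k+3 dividors count: {counter2}"}
-- ===== SOURCE B (Python) =====
-- def prob38a(n):
--     counts = [0, 0, 0, 0]
--     d = 1
--     while d * d <= n: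
--         if n % d == 0:
--             counts[d % 4] += 1
--             if n // d != d:
--                 counts[(n // d) % 4] += 1
--         d += 1
--     counter1 = counts[1]
--     counter2 = counts[3]
--     return {"result": f"{n}: {counter1 >= counter2}, 4k+1 dividors count: {counter1}, 4k+3 dividors count: {counter2}"}
-- ===== Notes on version B (the rewrite author's own statement) =====
-- stated objective: faster
-- what changed: B enumerates only d up to sqrt(n) and counts each divisor pair (d, n//d), instead of A's scan of every d from 1 to n.
import Mathlib
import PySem

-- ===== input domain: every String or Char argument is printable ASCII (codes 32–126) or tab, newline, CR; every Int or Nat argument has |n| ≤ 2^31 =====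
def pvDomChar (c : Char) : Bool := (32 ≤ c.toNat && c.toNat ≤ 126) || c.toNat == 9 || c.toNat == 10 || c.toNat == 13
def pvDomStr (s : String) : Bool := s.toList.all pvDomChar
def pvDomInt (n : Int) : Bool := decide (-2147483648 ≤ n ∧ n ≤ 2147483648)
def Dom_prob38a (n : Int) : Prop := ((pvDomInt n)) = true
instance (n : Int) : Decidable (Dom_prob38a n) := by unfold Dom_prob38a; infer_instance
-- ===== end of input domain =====

-- B replaces A's scan of every d in 1..n by a divisor-pair enumeration up to sqrt(n) (objective: faster, O), same return value.

-- shared helper: the f-string both Pythons build from (n, counter1, counter2)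
def fmtResult (n c1 c2 : Int) : List (String × String) :=
  [("result", PySem.Int.toStr n ++ ": " ++ (if c1 ≥ c2 then "True" else "False") ++
    ", 4k+1 dividors count: " ++ PySem.Int.toStr c1 ++ ", 4k+3 dividors count: " ++ PySem.Int.toStr c2)]

-- ===== PORT A =====
def prob38a (n : Int) : List (String × String) :=
  let c := (PySem.List.pyRange 1 (n + 1) 1).foldl
    (fun (c : Int × Int) d =>
      if PySem.Int.mod n d = 0 then
        if PySem.Int.mod d 4 = 1 then (c.1 + 1, c.2)
        else if PySem.Int.mod d 4 = 3 then (c.1, c.2 + 1)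
        else c
      else c) (0, 0)
  fmtResult n c.1 c.2

-- ===== PORT B =====
-- the while-loop of Source B: d runs while d*d <= n; counts is the 4-slot residue table;
-- the indices d % 4 and (n // d) % 4 are always in range of the 4-element list, so pyGetD/pySetD are exact here
def probLoop (n : Int) (d : Nat) (counts : List Int) : List Int :=
  if h : (d : Int) * d ≤ n then
    let counts' :=
      if PySem.Int.mod n d = 0 then
        let c1 := PySem.List.pySetD counts (PySem.Int.mod (d : Int) 4)
          (PySem.List.pyGetD counts (PySem.Int.mod (d : Int) 4) 0 + 1)
        if PySem.Int.floordiv n d ≠ (d : Int) then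
          PySem.List.pySetD c1 (PySem.Int.mod (PySem.Int.floordiv n d) 4)
            (PySem.List.pyGetD c1 (PySem.Int.mod (PySem.Int.floordiv n d) 4) 0 + 1)
        else c1
      else counts
    probLoop n (d + 1) counts'
  else counts
termination_by (n + 1 - d).toNat
decreasing_by
  have hd : (d : Int) ≤ (d : Int) * d := by nlinarith [Int.natCast_nonneg d]
  omega

def prob38a_alt (n : Int) : List (String × String) :=
  let counts := probLoop n 1 [0, 0, 0, 0]
  let counter1 := PySem.List.pyGetD counts 1 0
  let counter2 := PySem.List.pyGetD counts 3 0
  fmtResult n counter1 counter2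

-- ===== PRECONDITION & SPEC =====
def Spec_prob38a (n : Int) (out : List (String × String)) : Prop := out = prob38a_alt n
instance (n : Int) (out : List (String × String)) : Decidable (Spec_prob38a n out) := by unfold Spec_prob38a; infer_instance

-- ===== CLAIM (what is proved, stated in full; the proofs are below) =====
def Claim_equal_prob38a : Prop := ∀ (n : Int), Dom_prob38a n → Spec_prob38a n (prob38a n)



-- ===== LEMMAS AND PROOFS =====

-- count of divisors d of N with 1 <= d <= M and d % 4 = r
def cntA (N M r : Nat) : Int :=
  (((Finset.Ico 1 (M + 1)).filter (fun d => d ∣ N ∧ d % 4 = r)).card : Int)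

-- count of divisors x of N with x % 4 = r whose small partner min x (N/x) is >= d
def cntB (N d r : Nat) : Int :=
  (((Finset.Ico 1 (N + 1)).filter (fun x => x ∣ N ∧ x % 4 = r ∧ d ≤ min x (N / x))).card : Int)

theorem cntA_succ (N M r : Nat) :
    cntA N (M + 1) r = cntA N M r
      + (if (M + 1) ∣ N then (if (M + 1) % 4 = r then 1 else 0) else 0) := by
  unfold cntA
  rw [show Finset.Ico 1 (M + 1 + 1) = insert (M + 1) (Finset.Ico 1 (M + 1)) from
    Nat.Ico_succ_right_eq_insert_Ico (by omega), Finset.filter_insert]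
  split_ifs <;>
    first
      | (exfalso; tauto)
      | (rw [Finset.card_insert_of_notMem (by simp)]; push_cast; omega)
      | (push_cast; omega)

theorem mod_natCast_eq_one_iff (a : Nat) : PySem.Int.mod ((a : Nat) : Int) 4 = 1 ↔ a % 4 = 1 := by
  have h4 : ((4 : Nat) : Int) = 4 := by norm_num
  rw [← h4, PySem.Int.mod_natCast]
  omega

theorem mod_natCast_eq_three_iff (a : Nat) : PySem.Int.mod ((a : Nat) : Int) 4 = 3 ↔ a % 4 = 3 := by
  have h4 : ((4 : Nat) : Int) = 4 := by norm_num
  rw [← h4, PySem.Int.mod_natCast]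
  omega

theorem mod_natCast_eq_zero_iff (N a : Nat) :
    PySem.Int.mod ((N : Nat) : Int) ((a : Nat) : Int) = 0 ↔ a ∣ N := by
  rw [PySem.Int.mod_eq_zero_iff_dvd]
  exact Int.natCast_dvd_natCast

theorem foldA_eq (N : Nat) (M : Nat) (a b : Int) :
    (PySem.List.pyRange 1 ((M : Int) + 1) 1).foldl
      (fun (c : Int × Int) d =>
        if PySem.Int.mod (N : Int) d = 0 then
          if PySem.Int.mod d 4 = 1 then (c.1 + 1, c.2)
          else if PySem.Int.mod d 4 = 3 then (c.1, c.2 + 1)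
          else c
        else c) (a, b) = (a + cntA N M 1, b + cntA N M 3) := by
  induction M generalizing a b with
  | zero =>
      rw [show ((0 : Nat) : Int) + 1 = 1 by norm_num,
        PySem.List.pyRange_one_eq_nil (by norm_num)]
      simp [cntA]
  | succ M ih =>
      rw [show (((M + 1 : Nat)) : Int) + 1 = ((M : Int) + 1) + 1 by push_cast; ring,
        PySem.List.pyRange_one_succ_right (by omega), List.foldl_append, ih]
      simp only [List.foldl_cons, List.foldl_nil]
      rw [show ((M : Int) + 1) = (((M + 1 : Nat)) : Int) by push_cast; ring]
      rw [cntA_succ, cntA_succ]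
      simp only [mod_natCast_eq_zero_iff, mod_natCast_eq_one_iff, mod_natCast_eq_three_iff]
      split_ifs <;> simp only [Prod.mk.injEq] <;> constructor <;> omega

theorem partner_dvd (N x : Nat) (h : x ∣ N) : N / x ∣ N := by
  obtain ⟨c, rfl⟩ := h
  rcases Nat.eq_zero_or_pos x with hx | hx
  · simp [hx]
  · rw [Nat.mul_div_cancel_left c hx]
    exact Dvd.intro_left x rfl

theorem cntB_zero (N d r : Nat) (h : N < d * d) : cntB N d r = 0 := by
  unfold cntB
  norm_cast
  rw [Finset.card_eq_zero, Finset.filter_eq_empty_iff]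
  rintro x hx ⟨h1, _, h3⟩
  rw [Nat.le_min] at h3
  have hmul : d * d ≤ x * (N / x) := Nat.mul_le_mul h3.1 h3.2
  rw [Nat.mul_div_cancel' h1] at hmul
  omega

theorem min_partner_eq (N x d : Nat) (hN : 1 ≤ N) (hx : x ∣ N)
    (hmin : min x (N / x) = d) : x = d ∨ x = N / d := by
  rcases min_cases x (N / x) with ⟨he, _⟩ | ⟨he, _⟩
  · left; omega
  · right
    have hxd : N / x = d := by omega
    rw [← hxd, Nat.div_div_self hx (by omega)]

theorem cntB_step_ndvd (N d r : Nat) (hN : 1 ≤ N) (hdvd : ¬ d ∣ N) :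
    cntB N d r = cntB N (d + 1) r := by
  unfold cntB
  congr 2
  apply Finset.filter_congr
  intro x hx
  simp only [Finset.mem_Ico] at hx
  constructor
  · rintro ⟨h1, h2, h3⟩
    refine ⟨h1, h2, ?_⟩
    rcases Nat.lt_or_ge d (min x (N / x)) with hlt | hge
    · omega
    · have hmin : min x (N / x) = d := by omega
      rcases min_cases x (N / x) with ⟨he, _⟩ | ⟨he, _⟩
      · have hxd : x = d := by omega
        exact absurd (hxd ▸ h1) hdvd
      · have hxd : N / x = d := by omega
        exact absurd (hxd ▸ partner_dvd N x h1) hdvd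
  · rintro ⟨h1, h2, h3⟩
    exact ⟨h1, h2, by omega⟩

theorem pair_filter_card (N d r : Nat) (hN : 1 ≤ N) (hd : 1 ≤ d) (hdd : d * d ≤ N) (hdvd : d ∣ N) :
    ((({d, N / d} : Finset Nat)).filter (fun x => x % 4 = r)).card =
      (if d % 4 = r then 1 else 0)
        + (if N / d = d then 0 else if (N / d) % 4 = r then 1 else 0) := by
  by_cases hq : N / d = d
  · rw [hq]
    by_cases h1 : d % 4 = r <;> simp [Finset.filter_singleton, h1]
  · have hne : d ∉ ({N / d} : Finset Nat) := by simp [Ne.symm hq]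
    rw [Finset.filter_insert, Finset.filter_singleton]
    by_cases h1 : d % 4 = r <;> by_cases h2 : (N / d) % 4 = r <;>
      simp [h1, h2, hq, Finset.card_insert_of_notMem, hne]

theorem cntB_step_dvd (N d r : Nat) (hN : 1 ≤ N) (hd : 1 ≤ d) (hdd : d * d ≤ N) (hdvd : d ∣ N) :
    cntB N d r = cntB N (d + 1) r
      + (if d % 4 = r then 1 else 0)
      + (if N / d = d then 0 else if (N / d) % 4 = r then 1 else 0) := by
  have hdN : d ≤ N := Nat.le_of_dvd (by omega) hdvd
  have hddiv : d ≤ N / d := (Nat.le_div_iff_mul_le (by omega)).2 hdd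
  have key := Finset.card_filter_add_card_filter_not
    (s := (Finset.Ico 1 (N + 1)).filter (fun x => x ∣ N ∧ x % 4 = r ∧ d ≤ min x (N / x)))
    (p := fun x => min x (N / x) = d)
  have hds : N / (N / d) = d := Nat.div_div_self hdvd (by omega)
  have hpd : N / d ∣ N := partner_dvd N d hdvd
  have hdle : N / d ≤ N := Nat.div_le_self N d
  have hA : ((Finset.Ico 1 (N + 1)).filter (fun x => x ∣ N ∧ x % 4 = r ∧ d ≤ min x (N / x))).filter
      (fun x => min x (N / x) = d) = (({d, N / d} : Finset Nat)).filter (fun x => x % 4 = r) := by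
    ext x
    simp only [Finset.mem_filter, Finset.mem_Ico, Finset.mem_insert, Finset.mem_singleton]
    constructor
    · rintro ⟨⟨hx, h1, h2, h3⟩, h4⟩
      exact ⟨min_partner_eq N x d (by omega) h1 h4, h2⟩
    · rintro ⟨hx, h2⟩
      rcases hx with hxd | hxd <;> rw [hxd] at h2 ⊢
      · have hm : min d (N / d) = d := min_eq_left hddiv
        exact ⟨⟨⟨by omega, by omega⟩, hdvd, h2, by rw [Nat.le_min]; exact ⟨le_rfl, hddiv⟩⟩, hm⟩
      · have hm : min (N / d) (N / (N / d)) = d := by rw [hds]; exact min_eq_right hddiv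
        exact ⟨⟨⟨by omega, by omega⟩, hpd, h2,
          by rw [Nat.le_min, hds]; exact ⟨hddiv, le_rfl⟩⟩, hm⟩
  have hB : ((Finset.Ico 1 (N + 1)).filter (fun x => x ∣ N ∧ x % 4 = r ∧ d ≤ min x (N / x))).filter
      (fun x => ¬ min x (N / x) = d) =
      (Finset.Ico 1 (N + 1)).filter (fun x => x ∣ N ∧ x % 4 = r ∧ d + 1 ≤ min x (N / x)) := by
    rw [Finset.filter_filter]
    apply Finset.filter_congr
    intro x hx
    constructor
    · rintro ⟨⟨h1, h2, h3⟩, h4⟩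
      exact ⟨h1, h2, by omega⟩
    · rintro ⟨h1, h2, h3⟩
      exact ⟨⟨h1, h2, by omega⟩, by omega⟩
  rw [hA, hB, pair_filter_card N d r hN hd hdd hdvd] at key
  unfold cntB
  split_ifs at key ⊢ <;> push_cast [← key] <;> ring

theorem cntA_eq_cntB (N : Nat) (hN : 1 ≤ N) (r : Nat) : cntA N N r = cntB N 1 r := by
  unfold cntA cntB
  congr 2
  apply Finset.filter_congr
  intro x hx
  simp only [Finset.mem_Ico] at hx
  have hxN : 1 ≤ N / x := (Nat.one_le_div_iff (by omega)).2 (by omega)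
  constructor
  · rintro ⟨h1, h2⟩
    exact ⟨h1, h2, by omega⟩
  · rintro ⟨h1, h2, _⟩
    exact ⟨h1, h2⟩

theorem probLoop_stop (n : Int) (d : Nat) (counts : List Int) (h : ¬ ((d : Int) * d ≤ n)) :
    probLoop n d counts = counts := by
  rw [probLoop, dif_neg h]

theorem probLoop_step (n : Int) (d : Nat) (counts : List Int) (h : (d : Int) * d ≤ n) :
    probLoop n d counts = probLoop n (d + 1)
      (if PySem.Int.mod n d = 0 then
        let c1 := PySem.List.pySetD counts (PySem.Int.mod (d : Int) 4)
          (PySem.List.pyGetD counts (PySem.Int.mod (d : Int) 4) 0 + 1)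
        if PySem.Int.floordiv n d ≠ (d : Int) then
          PySem.List.pySetD c1 (PySem.Int.mod (PySem.Int.floordiv n d) 4)
            (PySem.List.pyGetD c1 (PySem.Int.mod (PySem.Int.floordiv n d) 4) 0 + 1)
        else c1
      else counts) := by
  rw [probLoop, dif_pos h]

theorem mod_natCast_four (a : Nat) :
    PySem.Int.mod ((a : Nat) : Int) 4 = ((a % 4 : Nat) : Int) := by
  have h4 : ((4 : Nat) : Int) = 4 := by norm_num
  rw [← h4, PySem.Int.mod_natCast]

theorem bump_eval (a0 a1 a2 a3 : Int) (v : Nat) :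
    PySem.List.pySetD [a0, a1, a2, a3] ((v % 4 : Nat) : Int)
      (PySem.List.pyGetD [a0, a1, a2, a3] ((v % 4 : Nat) : Int) 0 + 1) =
      [if v % 4 = 0 then a0 + 1 else a0, if v % 4 = 1 then a1 + 1 else a1,
       if v % 4 = 2 then a2 + 1 else a2, if v % 4 = 3 then a3 + 1 else a3] := by
  rcases (by omega : v % 4 = 0 ∨ v % 4 = 1 ∨ v % 4 = 2 ∨ v % 4 = 3) with h|h|h|h <;>
    rw [h] <;> rfl

theorem cast_sq_le (N d : Nat) (h : (d : Int) * d ≤ (N : Int)) : d * d ≤ N := by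
  have h2 : ((d * d : Nat) : Int) ≤ (N : Int) := by push_cast; exact h
  exact_mod_cast h2

theorem cast_sq_gt (N d : Nat) (h : ¬ ((d : Int) * d ≤ (N : Int))) : N < d * d := by
  by_contra hcon
  exact h (by exact_mod_cast Nat.le_of_not_lt hcon)

theorem loopB_eq (N : Nat) (hN : 1 ≤ N) :
    ∀ (k d : Nat) (a0 a1 a2 a3 : Int), 1 ≤ d → N < (d + k) * (d + k) →
      probLoop (N : Int) d [a0, a1, a2, a3] =
        [a0 + cntB N d 0, a1 + cntB N d 1, a2 + cntB N d 2, a3 + cntB N d 3] := by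
  intro k
  induction k with
  | zero =>
      intro d a0 a1 a2 a3 hd hk
      have hk' : N < d * d := by simpa using hk
      have hc : ¬ ((d : Int) * d ≤ (N : Int)) := by
        intro hc
        have := cast_sq_le N d hc
        omega
      rw [probLoop_stop _ _ _ hc, cntB_zero N d 0 hk', cntB_zero N d 1 hk',
        cntB_zero N d 2 hk', cntB_zero N d 3 hk']
      simp
  | succ k ih =>
      intro d a0 a1 a2 a3 hd hk
      by_cases hc : ((d : Int) * d ≤ (N : Int))
      · have hdd : d * d ≤ N := cast_sq_le N d hc
        rw [probLoop_step _ _ _ hc]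
        have ih' := fun a0 a1 a2 a3 => ih (d + 1) a0 a1 a2 a3 (by omega)
          (by rw [show d + 1 + k = d + (k + 1) from by omega]; exact hk)
        by_cases hdvd : d ∣ N
        · have hm0 : PySem.Int.mod ((N : Nat) : Int) ((d : Nat) : Int) = 0 :=
            (mod_natCast_eq_zero_iff N d).2 hdvd
          have hq : PySem.Int.floordiv ((N : Nat) : Int) ((d : Nat) : Int) = (((N / d : Nat)) : Int) := by
            rw [PySem.Int.floordiv_eq_ediv_of_pos (by exact_mod_cast hd)]
            exact (Int.natCast_div N d).symm
          rw [if_pos hm0]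
          simp only [hq, ne_eq, Nat.cast_inj, mod_natCast_four]
          rw [bump_eval a0 a1 a2 a3 d]
          by_cases hne : N / d = d
          · rw [if_neg (by simp [hne])]
            rw [ih', cntB_step_dvd N d 0 hN hd hdd hdvd, cntB_step_dvd N d 1 hN hd hdd hdvd,
              cntB_step_dvd N d 2 hN hd hdd hdvd, cntB_step_dvd N d 3 hN hd hdd hdvd]
            rcases (by omega : d % 4 = 0 ∨ d % 4 = 1 ∨ d % 4 = 2 ∨ d % 4 = 3) with hr|hr|hr|hr <;>
              simp only [hr, hne, if_true, List.cons.injEq, and_true] <;> omega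
          · rw [if_pos (by simp [hne])]
            rw [bump_eval _ _ _ _ (N / d)]
            rw [ih', cntB_step_dvd N d 0 hN hd hdd hdvd, cntB_step_dvd N d 1 hN hd hdd hdvd,
              cntB_step_dvd N d 2 hN hd hdd hdvd, cntB_step_dvd N d 3 hN hd hdd hdvd]
            rcases (by omega : d % 4 = 0 ∨ d % 4 = 1 ∨ d % 4 = 2 ∨ d % 4 = 3) with hr|hr|hr|hr <;>
              rcases (by omega : N / d % 4 = 0 ∨ N / d % 4 = 1 ∨ N / d % 4 = 2 ∨ N / d % 4 = 3) with hs|hs|hs|hs <;>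
                simp only [hr, hs, hne, if_true, if_false, List.cons.injEq, and_true] <;> omega
        · have hm0 : ¬ PySem.Int.mod ((N : Nat) : Int) ((d : Nat) : Int) = 0 :=
            fun hcc => hdvd ((mod_natCast_eq_zero_iff N d).1 hcc)
          rw [if_neg hm0, ih', cntB_step_ndvd N d 0 hN hdvd, cntB_step_ndvd N d 1 hN hdvd,
            cntB_step_ndvd N d 2 hN hdvd, cntB_step_ndvd N d 3 hN hdvd]
      · have hdd : N < d * d := cast_sq_gt N d hc
        rw [probLoop_stop _ _ _ hc, cntB_zero N d 0 hdd, cntB_zero N d 1 hdd,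
          cntB_zero N d 2 hdd, cntB_zero N d 3 hdd]
        simp

theorem prob38a_spec : Claim_equal_prob38a := by
  intro n _
  unfold Spec_prob38a
  simp only [prob38a, prob38a_alt]
  by_cases hn : 1 ≤ n
  · have hN : n = ((n.toNat : Nat) : Int) := by omega
    rw [hN]
    rw [foldA_eq n.toNat n.toNat 0 0]
    rw [loopB_eq n.toNat (by omega) n.toNat 1 0 0 0 0 (by omega) (by nlinarith)]
    rw [cntA_eq_cntB n.toNat (by omega) 1, cntA_eq_cntB n.toNat (by omega) 3]
    all_goals rfl
  · rw [PySem.List.pyRange_one_eq_nil (by omega),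
      probLoop_stop _ _ _ (by push_cast; omega)]
    all_goals rfl

-- ===== VERDICT (by name: the statement is the Claim_ definition above) =====
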